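-- pv_equiv track=rewrite | github.com/OOAAHH/TrySomeDiffcult | NW算法实现9.0_CUDA/9.1.py | calculate_alignment_metrics
-- ===== SOURCE A (Python) =====
-- def calculate_alignment_metrics(aligned_A, aligned_B):
--     """
--     计算比对的各项指标。
--     """
--     length = len(aligned_A)
--     identity = 0
--     similarity = 0
--     gaps = 0
--     score = 0
--     match_score = 1
--     mismatch_score = 0
--     gap_penalty = -2
--
--     for a, b in zip(aligned_A, aligned_B):
--         if a == '-' or b == '-':
--             gaps += 1
--             score += gap_penalty
--         elif a == b:
--             identity += 1
--             similarity += 1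
--             score += match_score
--         else:
--             similarity += 1
--             score += mismatch_score
--
--     metrics = {
--         'length': length,
--         'identity': identity,
--         'similarity': similarity,
--         'gaps': gaps,
--         'score': score
--     }
--     return metrics
-- ===== SOURCE B (Python) =====
-- def calculate_alignment_metrics(aligned_A, aligned_B):
--     pairs = list(zip(aligned_A, aligned_B))
--     gaps = sum(1 for a, b in pairs if a == '-' or b == '-')
--     identity = sum(1 for a, b in pairs if a == b and a != '-')
--     return {
--         'length': len(aligned_A),
--         'identity': identity,
--         'similarity': len(pairs) - gaps,
--         'gaps': gaps,
--         'score': identity - 2 * gaps,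
--     }
-- ===== Notes on version B (the rewrite author's own statement) =====
-- stated objective: simpler
-- what changed: Replaces the four-field branching accumulator loop with two independent counts over the zipped pairs (gaps and identity) and derives similarity and score by closed-form arithmetic (similarity = zipped length - gaps, score = identity - 2*gaps since mismatch_score is 0).
import Mathlib
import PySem

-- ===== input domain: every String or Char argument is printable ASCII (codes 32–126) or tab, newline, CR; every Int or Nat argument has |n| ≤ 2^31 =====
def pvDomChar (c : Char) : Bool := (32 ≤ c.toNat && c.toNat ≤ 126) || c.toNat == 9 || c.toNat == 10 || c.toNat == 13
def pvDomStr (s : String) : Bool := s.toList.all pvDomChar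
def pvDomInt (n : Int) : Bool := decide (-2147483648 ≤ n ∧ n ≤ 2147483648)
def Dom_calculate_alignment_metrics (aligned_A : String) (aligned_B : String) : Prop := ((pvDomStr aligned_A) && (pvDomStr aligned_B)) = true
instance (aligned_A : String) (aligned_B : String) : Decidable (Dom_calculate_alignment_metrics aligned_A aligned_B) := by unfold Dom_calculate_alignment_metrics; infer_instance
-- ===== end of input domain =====

-- ===== PORT A =====
-- B: two countP primitives over the zipped pairs plus closed-form arithmetic, instead of A's four-field accumulator loop (objective: simpler).
def calculate_alignment_metrics (aligned_A : String) (aligned_B : String) : List (String × Int) :=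
  let st := (List.zip aligned_A.toList aligned_B.toList).foldl
    (fun (s : Int × Int × Int × Int) (p : Char × Char) =>
      if p.1 = '-' ∨ p.2 = '-' then (s.1, s.2.1, s.2.2.1 + 1, s.2.2.2 + (-2))
      else if p.1 = p.2 then (s.1 + 1, s.2.1 + 1, s.2.2.1, s.2.2.2 + 1)
      else (s.1, s.2.1 + 1, s.2.2.1, s.2.2.2 + 0))
    ((0 : Int), (0 : Int), (0 : Int), (0 : Int))
  [("length", (aligned_A.toList.length : Int)), ("identity", st.1),
   ("similarity", st.2.1), ("gaps", st.2.2.1), ("score", st.2.2.2)]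

-- ===== PORT B =====
def calculate_alignment_metrics_alt (aligned_A : String) (aligned_B : String) : List (String × Int) :=
  let pairs := List.zip aligned_A.toList aligned_B.toList
  let gaps : Int := pairs.countP (fun p => p.1 == '-' || p.2 == '-')
  let identity : Int := pairs.countP (fun p => p.1 == p.2 && p.1 != '-')
  [("length", (aligned_A.toList.length : Int)), ("identity", identity),
   ("similarity", (pairs.length : Int) - gaps), ("gaps", gaps),
   ("score", identity - 2 * gaps)]

-- ===== PRECONDITION & SPEC =====
def Spec_calculate_alignment_metrics (aligned_A : String) (aligned_B : String) (out : List (String × Int)) : Prop := out = calculate_alignment_metrics_alt aligned_A aligned_B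
instance (aligned_A : String) (aligned_B : String) (out : List (String × Int)) : Decidable (Spec_calculate_alignment_metrics aligned_A aligned_B out) := by unfold Spec_calculate_alignment_metrics; infer_instance

-- ===== CLAIM (what is proved, stated in full; the proofs are below) =====
def Claim_equal_calculate_alignment_metrics : Prop := ∀ (aligned_A : String) (aligned_B : String), Dom_calculate_alignment_metrics aligned_A aligned_B → Spec_calculate_alignment_metrics aligned_A aligned_B (calculate_alignment_metrics aligned_A aligned_B)

-- ===== LEMMAS AND PROOFS =====

-- ===== VERDICT (by name: the statement is the Claim_ definition above) =====

theorem pv_fold_char (l : List (Char × Char)) : ∀ (i s g sc : Int),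
    l.foldl (fun (s : Int × Int × Int × Int) (p : Char × Char) =>
      if p.1 = '-' ∨ p.2 = '-' then (s.1, s.2.1, s.2.2.1 + 1, s.2.2.2 + (-2))
      else if p.1 = p.2 then (s.1 + 1, s.2.1 + 1, s.2.2.1, s.2.2.2 + 1)
      else (s.1, s.2.1 + 1, s.2.2.1, s.2.2.2 + 0)) (i, s, g, sc)
    = (i + l.countP (fun p => p.1 == p.2 && p.1 != '-'),
       s + ((l.length : Int) - l.countP (fun p => p.1 == '-' || p.2 == '-')),
       g + l.countP (fun p => p.1 == '-' || p.2 == '-'),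
       sc + (l.countP (fun p => p.1 == p.2 && p.1 != '-')
             - 2 * l.countP (fun p => p.1 == '-' || p.2 == '-'))) := by
  induction l with
  | nil => intro i s g sc; simp
  | cons p t ih =>
    intro i s g sc
    by_cases hg : p.1 = '-' ∨ p.2 = '-'
    · have hid : (p.1 == p.2 && p.1 != '-') = false := by
        rcases hg with h | h
        · simp [h]
        · by_cases h1 : p.1 = '-' <;> simp [h, h1]
      have hga : (p.1 == '-' || p.2 == '-') = true := by
        rcases hg with h | h <;> simp [h]
      simp only [List.foldl_cons, List.countP_cons, List.length_cons, hid, hga,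
        if_pos hg, Bool.false_eq_true, if_false, if_true, ih, Prod.mk.injEq]
      refine ⟨by push_cast; ring, by push_cast; ring, by push_cast; ring, by push_cast; ring⟩
    · have hga : (p.1 == '-' || p.2 == '-') = false := by
        push_neg at hg; simp [hg.1, hg.2]
      by_cases he : p.1 = p.2
      · have hid : (p.1 == p.2 && p.1 != '-') = true := by
          push_neg at hg; simp [he, hg.2]
        simp only [List.foldl_cons, List.countP_cons, List.length_cons, hid, hga,
          if_neg hg, if_pos he, Bool.false_eq_true, if_false, if_true, ih, Prod.mk.injEq]
        refine ⟨by push_cast; ring, by push_cast; ring, by push_cast; ring, by push_cast; ring⟩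
      · have hid : (p.1 == p.2 && p.1 != '-') = false := by simp [he]
        simp only [List.foldl_cons, List.countP_cons, List.length_cons, hid, hga,
          if_neg hg, if_neg he, Bool.false_eq_true, if_false, ih, Prod.mk.injEq]
        refine ⟨by push_cast; ring, by push_cast; ring, by push_cast; ring, by push_cast; ring⟩

theorem calculate_alignment_metrics_spec : Claim_equal_calculate_alignment_metrics := by
  intro aligned_A aligned_B _
  unfold Spec_calculate_alignment_metrics calculate_alignment_metrics calculate_alignment_metrics_alt
  simp only [pv_fold_char, zero_add]
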